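-- pv_equiv track=rewrite | github.com/mansijp/Python-Programming-I-MOOC-2023 | part07/02 - special_characters.py | separate_characters
-- ===== SOURCE A (Python) =====
-- import string
--
-- def separate_characters(my_string: str):
--     a = ''
--     b = ''
--     c = ''
--     for i in my_string:
--         if (i in string.ascii_letters):
--             a += i
--         elif (i in string.punctuation):
--             b += i
--         else:
--             c += i
--     return((a, b, c))
-- ===== SOURCE B (Python) =====
-- import string
--
-- def separate_characters(my_string: str):
--     letters = set(string.ascii_letters)
--     punct = set(string.punctuation)
--     a = ''.join(ch for ch in my_string if ch in letters)
--     b = ''.join(ch for ch in my_string if ch not in letters and ch in punct)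
--     c = ''.join(ch for ch in my_string if ch not in letters and ch not in punct)
--     return (a, b, c)
-- ===== Notes on version B (the rewrite author's own statement) =====
-- stated objective: idiomatic
-- what changed: Replaces the single loop carrying three string accumulators with three independent filtered joins over the string, one per output component, with set-based membership tests.
import Mathlib
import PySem

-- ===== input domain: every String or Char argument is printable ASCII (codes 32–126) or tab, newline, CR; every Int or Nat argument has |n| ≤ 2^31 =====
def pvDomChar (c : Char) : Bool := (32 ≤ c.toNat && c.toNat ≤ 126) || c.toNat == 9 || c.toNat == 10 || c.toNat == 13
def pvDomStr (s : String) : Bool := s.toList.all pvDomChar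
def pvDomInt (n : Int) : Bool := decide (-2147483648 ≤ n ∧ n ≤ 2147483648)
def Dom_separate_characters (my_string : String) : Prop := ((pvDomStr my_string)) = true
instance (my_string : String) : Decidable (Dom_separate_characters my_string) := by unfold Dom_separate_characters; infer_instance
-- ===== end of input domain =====

-- B: three independent filtered passes (one per output component) instead of one loop with three accumulators; same values.
-- ===== PORT A =====
-- string.ascii_letters and string.punctuation, as literal char lists
def scLetters : List Char := "abcdefghijklmnopqrstuvwxyzABCDEFGHIJKLMNOPQRSTUVWXYZ".toList
def scPunct : List Char := "!\"#$%&'()*+,-./:;<=>?@[\\]^_`{|}~".toList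

def separate_characters (my_string : String) : String × String × String :=
  let r := my_string.toList.foldl
    (fun (acc : List Char × List Char × List Char) i =>
      if scLetters.contains i then (acc.1 ++ [i], acc.2.1, acc.2.2)
      else if scPunct.contains i then (acc.1, acc.2.1 ++ [i], acc.2.2)
      else (acc.1, acc.2.1, acc.2.2 ++ [i]))
    ([], [], [])
  (String.mk r.1, String.mk r.2.1, String.mk r.2.2)

-- ===== PORT B =====
def separate_characters_alt (my_string : String) : String × String × String :=
  let cs := my_string.toList
  (String.mk (cs.filter (fun ch => scLetters.contains ch)),
   String.mk (cs.filter (fun ch => !scLetters.contains ch && scPunct.contains ch)),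
   String.mk (cs.filter (fun ch => !scLetters.contains ch && !scPunct.contains ch)))

-- ===== PRECONDITION & SPEC =====
def Spec_separate_characters (my_string : String) (out : String × String × String) : Prop := out = separate_characters_alt my_string
instance (my_string : String) (out : String × String × String) : Decidable (Spec_separate_characters my_string out) := by unfold Spec_separate_characters; infer_instance

-- ===== CLAIM (what is proved, stated in full; the proofs are below) =====
def Claim_equal_separate_characters : Prop := ∀ (my_string : String), Dom_separate_characters my_string → Spec_separate_characters my_string (separate_characters my_string)

-- ===== LEMMAS AND PROOFS =====

-- loop invariant: the fold appends exactly the three filtered subsequences to the accumulators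
theorem sc_foldl_inv (cs a b c : List Char) :
    cs.foldl
      (fun (acc : List Char × List Char × List Char) i =>
        if i ∈ scLetters then (acc.1 ++ [i], acc.2.1, acc.2.2)
        else if i ∈ scPunct then (acc.1, acc.2.1 ++ [i], acc.2.2)
        else (acc.1, acc.2.1, acc.2.2 ++ [i])) (a, b, c)
    = (a ++ cs.filter (fun ch => decide (ch ∈ scLetters)),
       b ++ cs.filter (fun ch => !decide (ch ∈ scLetters) && decide (ch ∈ scPunct)),
       c ++ cs.filter (fun ch => !decide (ch ∈ scLetters) && !decide (ch ∈ scPunct))) := by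
  induction cs generalizing a b c with
  | nil => simp
  | cons x xs ih =>
    by_cases hL : x ∈ scLetters
    · simp [hL, ih, List.filter_cons]
    · by_cases hP : x ∈ scPunct
      · simp [hL, hP, ih, List.filter_cons]
      · simp [hL, hP, ih, List.filter_cons]

-- ===== VERDICT (by name: the statement is the Claim_ definition above) =====
theorem separate_characters_spec : Claim_equal_separate_characters := by
  intro s _
  unfold Spec_separate_characters separate_characters separate_characters_alt
  simp [sc_foldl_inv]
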